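-- pv_equiv track=rewrite | github.com/thesocialcoin/ds-GenderDetection | src/utils.py | abc_dict
-- ===== SOURCE A (Python) =====
-- def abc_dict(string_keys_dic):
--     """
--     Objective: From a string keys dictionary, create a nested dictionary, where First level keys is the abecedary,
--     second level keys are the original keys, abecedary sorted.
--
--     @param string_keys_dic: (dict) A dictionary whose keys are strings
--     @return: (dict) A nested dictionary. First level keys is the abecedary, second level keys are the names
--     """
--     abc_dic = {}
--     for key, value in string_keys_dic.items():
--         if key[0] in abc_dic:
--             abc_dic[key[0]][key] = value
--         else:
--             abc_dic[key[0]] = {key: value}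
--     return abc_dic
-- ===== SOURCE B (Python) =====
-- def abc_dict(string_keys_dic):
--     # Gather strategy: first compute the distinct initials in first-appearance
--     # order, then build each bucket with one filtering comprehension per initial.
--     initials = dict.fromkeys(key[0] for key in string_keys_dic)
--     return {c: {key: value for key, value in string_keys_dic.items() if key[0] == c}
--             for c in initials}
-- ===== Notes on version B (the rewrite author's own statement) =====
-- stated objective: alternative
-- what changed: A scatters items into nested dicts in one hash-bucketing pass; B first collects the distinct initials in first-appearance order (dict.fromkeys) and then gathers each bucket with a separate filtering comprehension per initial.
-- outside the precondition, e.g. on abc_dict({'': 'x'}): A raises IndexError, B raises IndexError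
import Mathlib
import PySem

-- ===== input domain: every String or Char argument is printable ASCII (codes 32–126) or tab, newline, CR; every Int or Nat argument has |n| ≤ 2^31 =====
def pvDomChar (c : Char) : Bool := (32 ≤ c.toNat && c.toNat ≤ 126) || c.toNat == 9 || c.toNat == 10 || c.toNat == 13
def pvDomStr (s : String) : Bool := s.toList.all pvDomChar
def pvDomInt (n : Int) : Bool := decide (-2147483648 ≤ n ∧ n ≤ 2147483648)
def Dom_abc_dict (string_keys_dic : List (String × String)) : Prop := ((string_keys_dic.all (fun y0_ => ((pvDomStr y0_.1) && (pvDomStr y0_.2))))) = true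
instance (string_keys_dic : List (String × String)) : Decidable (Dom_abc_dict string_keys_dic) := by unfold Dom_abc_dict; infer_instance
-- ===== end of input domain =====

-- B groups by gathering (distinct initials first, then one filter per initial) instead of A's
-- single scatter pass into nested dicts; same result, alternative decomposition, no speed claim.

-- ===== PORT A =====
-- key[0] in Python is a 1-character string; none = IndexError on the empty key (excluded by Pre_)
def pvFirst? (s : String) : Option String := (PySem.Str.pyGet? s 0).map (fun ch => String.ofList [ch])

-- the body of A's for-loop over (key, value)
def pvStep (abc : PySem.Dict String (PySem.Dict String String)) (kv : String × String) :
    PySem.Dict String (PySem.Dict String String) :=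
  match pvFirst? kv.1 with
  | none => abc   -- key[0] raises IndexError; unreachable under Pre_
  | some c =>
    match abc.get? c with                              -- "if key[0] in abc_dic"
    | some inner => abc.insert c (inner.insert kv.1 kv.2)
    | none => abc.insert c (PySem.Dict.ofList [(kv.1, kv.2)])

def abc_dict (string_keys_dic : List (String × String)) : List (String × List (String × String)) :=
  ((string_keys_dic.foldl pvStep PySem.Dict.empty).items).map (fun p => (p.1, p.2.items))

-- ===== PORT B =====
-- initials = dict.fromkeys(key[0] for key in d)  — ordered dedup (PySem.List.dedup);
-- the inner dict comprehension over keys that are distinct (Pre_) is exactly the filtered item list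
def abc_dict_alt (string_keys_dic : List (String × String)) : List (String × List (String × String)) :=
  let initials := PySem.List.dedup (string_keys_dic.filterMap (fun kv => pvFirst? kv.1))
  initials.map (fun c => (c, string_keys_dic.filter (fun kv => pvFirst? kv.1 == some c)))

-- ===== PRECONDITION & SPEC =====
-- Pre_ excludes (a) inputs having a zero-length key, where A raises IndexError at key[0] (B raises too),
-- and (b) association lists with duplicate keys, which do not represent any Python dict
-- (the argument is a dict, so its keys are distinct).
def Pre_abc_dict (string_keys_dic : List (String × String)) : Prop :=
  (∀ kv ∈ string_keys_dic, kv.1 ≠ "") ∧ (string_keys_dic.map Prod.fst).Nodup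
instance (string_keys_dic : List (String × String)) : Decidable (Pre_abc_dict string_keys_dic) := by
  unfold Pre_abc_dict; infer_instance

def pvWitness_abc_dict : (List (String × String)) := [("apple", "1"), ("ant", "2"), ("bee", "3")]

def Spec_abc_dict (string_keys_dic : List (String × String)) (out : List (String × List (String × String))) : Prop := out = abc_dict_alt string_keys_dic
instance (string_keys_dic : List (String × String)) (out : List (String × List (String × String))) : Decidable (Spec_abc_dict string_keys_dic out) := by unfold Spec_abc_dict; infer_instance

-- ===== CLAIM (what is proved, stated in full; the proofs are below) =====
def Claim_equal_abc_dict : Prop := ∀ (string_keys_dic : List (String × String)), Dom_abc_dict string_keys_dic → Pre_abc_dict string_keys_dic → Spec_abc_dict string_keys_dic (abc_dict string_keys_dic)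

-- ===== LEMMAS AND PROOFS =====

-- abbreviations used only by the proofs
def pvG (l : List (String × String)) (c : String) : List (String × String) :=
  l.filter (fun kv => pvFirst? kv.1 == some c)

lemma pvFirst?_isSome {s : String} (h : s ≠ "") : ∃ c, pvFirst? s = some c := by
  have hl : s.toList ≠ [] := fun hnil => h (String.toList_eq_nil_iff.mp hnil)
  cases hs : s.toList with
  | nil => exact absurd hs hl
  | cons a as =>
    exact ⟨String.ofList [a], by simp [pvFirst?, hs]⟩

lemma get?_mk_map (ds : List String) (h : String → PySem.Dict String String) (c : String) :
    (PySem.Dict.mk (ds.map (fun c' => (c', h c')))).get? c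
      = if c ∈ ds then some (h (c)) else none := by
  induction ds with
  | nil => simp [PySem.Dict.get?]
  | cons d ds ih =>
    by_cases hc : d = c
    · subst hc; simp [PySem.Dict.get?_mk_cons]
    · simp only [List.map_cons, PySem.Dict.get?_mk_cons, beq_iff_eq, hc, if_false, ih,
        List.mem_cons]
      have : ¬ c = d := fun h' => hc h'.symm
      simp [this]

lemma pvG_nil_of_not_mem {l : List (String × String)} {c : String}
    (h : c ∉ l.filterMap (fun kv => pvFirst? kv.1)) : pvG l c = [] := by
  rw [pvG, List.filter_eq_nil_iff]
  intro kv hkv hb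
  exact h (List.mem_filterMap.2 ⟨kv, hkv, by simpa using (beq_iff_eq.1 hb)⟩)

lemma pvG_append {l : List (String × String)} {kv : String × String} {c c' : String}
    (hc : pvFirst? kv.1 = some c) :
    pvG (l ++ [kv]) c' = pvG l c' ++ (if c = c' then [kv] else []) := by
  rw [pvG, pvG, List.filter_append]
  congr 1
  by_cases h : c = c' <;> simp [hc, h]

-- the fold of A over a prefix with distinct, nonempty keys is exactly B's grouped table
lemma pvFold_eq (l : List (String × String))
    (h1 : ∀ kv ∈ l, kv.1 ≠ "") (h2 : (l.map Prod.fst).Nodup) :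
    l.foldl pvStep PySem.Dict.empty
      = PySem.Dict.mk ((PySem.List.dedup (l.filterMap (fun kv => pvFirst? kv.1))).map
          (fun c => (c, PySem.Dict.mk (pvG l c)))) := by
  induction l using List.reverseRecOn with
  | nil => rfl
  | append_singleton xs kv ih =>
    have h1' : ∀ p ∈ xs, p.1 ≠ "" := fun p hp => h1 p (List.mem_append_left _ hp)
    have hsplit : (xs.map Prod.fst).Nodup ∧ ∀ (a x : String), (a, x) ∈ xs → ¬a = kv.1 := by
      simpa [List.nodup_append] using h2
    have h2' : (xs.map Prod.fst).Nodup := hsplit.1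
    have hfresh : kv.1 ∉ xs.map Prod.fst := by
      intro hmem
      rcases List.mem_map.1 hmem with ⟨p, hp, hpe⟩
      exact hsplit.2 p.1 p.2 (by simpa using hp) hpe
    obtain ⟨c, hc⟩ := pvFirst?_isSome (h1 kv (by simp))
    set F := fun kv : String × String => pvFirst? kv.1 with hF
    have hFapp : (xs ++ [kv]).filterMap F = xs.filterMap F ++ [c] := by
      simp [hF, hc]
    rw [List.foldl_append, List.foldl_cons, List.foldl_nil, ih h1' h2', hFapp]
    set ds := PySem.List.dedup (xs.filterMap F) with hds
    set g := fun c' : String => (c', PySem.Dict.mk (pvG xs c')) with hg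
    have hget := get?_mk_map ds (fun c' => PySem.Dict.mk (pvG xs c')) c
    by_cases hmem : c ∈ ds
    · -- initial already present: A overwrites the inner dict in place
      have hded : PySem.List.dedup (xs.filterMap F ++ [c]) = ds := by
        simp only [PySem.List.dedup_eq_ofList, PySem.Set.ofList_append_singleton]
        exact PySem.Set.add_of_mem (by simpa [hds, PySem.List.dedup_eq_ofList] using hmem)
      have hcontains : (PySem.Dict.mk (ds.map g)).contains c = true := by
        rw [PySem.Dict.contains_eq_isSome_get?]
        simp only [hg]; rw [hget]; simp [hmem]
      have hinner : (PySem.Dict.mk (pvG xs c)).insert kv.1 kv.2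
          = PySem.Dict.mk (pvG xs c ++ [kv]) := by
        apply PySem.Dict.ext
        have hk1 : kv.1 ∉ (PySem.Dict.mk (pvG xs c)).keys := by
          intro hk
          apply hfresh
          simp only [PySem.Dict.keys] at hk
          rcases List.mem_map.1 hk with ⟨p, hp, hpe⟩
          exact List.mem_map.2 ⟨p, List.mem_of_mem_filter hp, hpe⟩
        have hg0 : (PySem.Dict.mk (pvG xs c)).get? kv.1 = none :=
          (PySem.Dict.get?_eq_none_iff_not_mem_keys _ _).2 hk1
        rw [PySem.Dict.items_insert_of_not_contains _ _
          (by rw [PySem.Dict.contains_eq_isSome_get?, hg0]; rfl)]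
      rw [hded, pvStep]
      simp only [hc, hg]
      rw [hget]
      simp only [hmem, if_true]
      apply PySem.Dict.ext
      rw [PySem.Dict.items_insert_of_contains _ _ (by simpa [hg] using hcontains)]
      simp only [List.map_map]
      apply List.map_congr_left
      intro c' hc'
      by_cases hcc : c' = c
      · subst hcc
        simp [hinner, pvG_append hc]
      · have hcc' : ¬ c = c' := fun h => hcc h.symm
        simp only [Function.comp_apply, beq_iff_eq, hcc, if_false]
        rw [pvG_append hc]
        simp [hcc']
    · -- fresh initial: A appends a new singleton inner dict
      have hded : PySem.List.dedup (xs.filterMap F ++ [c]) = ds ++ [c] := by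
        simp only [PySem.List.dedup_eq_ofList, PySem.Set.ofList_append_singleton]
        exact PySem.Set.add_of_not_mem (by simpa [hds, PySem.List.dedup_eq_ofList] using hmem)
      have hnotc : (PySem.Dict.mk (ds.map g)).get? c = none := by
        simp only [hg]; rw [hget]; simp [hmem]
      rw [hded, pvStep]
      simp only [hc, hnotc]
      apply PySem.Dict.ext
      rw [PySem.Dict.items_insert_of_not_contains _ _
        (by rw [PySem.Dict.contains_eq_isSome_get?, hnotc]; rfl)]
      rw [List.map_append]
      congr 1
      · apply List.map_congr_left
        intro c' hc'
        have hne : c ≠ c' := fun h => hmem (h ▸ hc')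
        rw [hg]
        simp only []
        rw [pvG_append hc]
        simp [hne]
      · have hGnil : pvG xs c = [] := by
          apply pvG_nil_of_not_mem
          simpa [hds, PySem.List.dedup_eq_ofList, PySem.Set.mem_ofList] using hmem
        rw [List.map_singleton]
        rw [pvG_append hc]
        simp only [hGnil, List.nil_append, if_pos]
        cases kv with | mk a b =>
        simp [PySem.Dict.ofList, PySem.Dict.update, PySem.Dict.insert, PySem.Dict.contains,
          PySem.Dict.empty]

-- ===== VERDICT (by name: the statement is the Claim_ definition above) =====
theorem abc_dict_spec : Claim_equal_abc_dict := by
  intro l _ hpre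
  unfold Spec_abc_dict abc_dict abc_dict_alt
  rw [pvFold_eq l hpre.1 hpre.2]
  simp only [List.map_map]
  rfl
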